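-- pv_equiv track=rewrite | github.com/weeklyweights-a11y/JobHunterAI | agents/ats.py | _dedupe_ats_jobs_by_title_company
-- ===== SOURCE A (Python) =====
-- def _merge_ats_locations(existing: str, extra: str) -> str:
--     """Pipe-separate unique posting locations (case-insensitive), same idea as LinkedIn."""
--     parts = [p.strip() for p in (existing or "").split("|") if p.strip()]
--     seen = {p.lower() for p in parts}
--     x = (extra or "").strip()
--     if x and x.lower() not in seen:
--         parts.append(x)
--     return " | ".join(parts)
--
-- def _ats_title_company_key(job: dict) -> tuple[str, str] | None:
--     t = str(job.get("title") or "").strip().lower()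
--     c = str(job.get("company") or "").strip().lower()
--     if not t or not c:
--         return None
--     return (t, c)
--
-- def _dedupe_ats_jobs_by_title_company(jobs: list[dict]) -> tuple[list[dict], int]:
--     """
--     One row per title×company: many ATS boards use a different listing URL per office.
--     Keeps the first row's URL; merges locations with ' | '.
--     Rows without both title and company are left unchanged and appended after keyed rows.
--     """
--     registry: dict[tuple[str, str], dict] = {}
--     order: list[tuple[str, str]] = []
--     unkeyed: list[dict] = []
--     for j in jobs:
--         key = _ats_title_company_key(j)
--         if key is None:
--             unkeyed.append(dict(j))
--             continue
--         if key not in registry: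
--             registry[key] = dict(j)
--             order.append(key)
--             continue
--         first = registry[key]
--         first["location"] = _merge_ats_locations(
--             str(first.get("location") or "").strip(),
--             str(j.get("location") or "").strip(),
--         )
--         d1 = str(first.get("job_description") or "")
--         d2 = str(j.get("job_description") or "")
--         if len(d2) > len(d1):
--             first["job_description"] = str(j.get("job_description") or "")
--     out = [registry[k] for k in order] + unkeyed
--     return out, len(jobs) - len(out)
-- ===== SOURCE B (Python) =====
-- def _merge_ats_locations(existing: str, extra: str) -> str:
--     parts = [p.strip() for p in (existing or "").split("|") if p.strip()]
--     seen = {p.lower() for p in parts}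
--     x = (extra or "").strip()
--     if x and x.lower() not in seen:
--         parts.append(x)
--     return " | ".join(parts)
--
-- def _ats_title_company_key(job: dict):
--     t = str(job.get("title") or "").strip().lower()
--     c = str(job.get("company") or "").strip().lower()
--     if not t or not c:
--         return None
--     return (t, c)
--
-- def _merge_job(acc: dict, j: dict) -> dict:
--     acc["location"] = _merge_ats_locations(
--         str(acc.get("location") or "").strip(),
--         str(j.get("location") or "").strip(),
--     )
--     if len(str(j.get("job_description") or "")) > len(str(acc.get("job_description") or "")):
--         acc["job_description"] = str(j.get("job_description") or "")
--     return acc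
--
-- def _dedupe_ats_jobs_by_title_company(jobs: list) -> tuple:
--     # Pass 1: group keyed jobs, collect unkeyed ones.
--     groups: dict = {}
--     unkeyed: list = []
--     for j in jobs:
--         key = _ats_title_company_key(j)
--         if key is None:
--             unkeyed.append(dict(j))
--         else:
--             groups.setdefault(key, []).append(dict(j))
--     # Pass 2: reduce each group to one merged row.
--     out = []
--     for g in groups.values():
--         acc = g[0]
--         for j in g[1:]:
--             acc = _merge_job(acc, j)
--         out.append(acc)
--     out += unkeyed
--     return out, len(jobs) - len(out)
-- ===== Notes on version B (the rewrite author's own statement) =====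
-- stated objective: alternative
-- what changed: Replaces A's single pass that interleaves merging into a registry dict while maintaining an explicit key-order list by a two-pass decomposition: pass 1 only groups job copies by title-company key (plus an unkeyed list), pass 2 folds each group down to one merged row in group-insertion order.
import Mathlib
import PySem

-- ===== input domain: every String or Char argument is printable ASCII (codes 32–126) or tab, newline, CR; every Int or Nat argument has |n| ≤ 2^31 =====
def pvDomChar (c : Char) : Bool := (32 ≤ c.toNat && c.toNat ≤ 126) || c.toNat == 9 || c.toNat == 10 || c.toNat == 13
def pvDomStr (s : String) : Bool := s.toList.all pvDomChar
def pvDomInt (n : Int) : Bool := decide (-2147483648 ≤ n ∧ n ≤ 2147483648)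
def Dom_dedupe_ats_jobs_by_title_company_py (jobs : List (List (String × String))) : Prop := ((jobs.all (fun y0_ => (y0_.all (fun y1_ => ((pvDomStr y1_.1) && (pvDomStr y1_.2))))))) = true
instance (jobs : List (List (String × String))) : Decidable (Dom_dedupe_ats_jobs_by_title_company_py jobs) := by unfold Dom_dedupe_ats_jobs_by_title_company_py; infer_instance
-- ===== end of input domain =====

-- B replaces A's single pass over an explicit registry/order pair by a two-pass decomposition:
-- group jobs by key first, then reduce each group; return value only (neither program mutates its input).

-- ===== PORT A =====
-- shared module helpers (_merge_ats_locations, _ats_title_company_key, dict get / dict item assignment)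
def jget (j : List (String × String)) (k : String) : String :=
  ((j.find? (fun p => p.1 == k)).map Prod.snd).getD ""

def jset (j : List (String × String)) (k v : String) : List (String × String) :=
  (PySem.Dict.insert ⟨j⟩ k v).items

def mergeLoc (existing extra : String) : String :=
  let parts := (((PySem.Str.split? existing "|").getD []).map PySem.Str.strip).filter (fun p => p ≠ "")
  let seen : PySem.Set String := PySem.Set.ofList (parts.map PySem.Str.lower)
  let x := PySem.Str.strip extra
  let parts := if x ≠ "" ∧ ¬ (PySem.Set.contains seen (PySem.Str.lower x) = true) then parts ++ [x] else parts
  PySem.Str.join " | " parts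

def atsKey (j : List (String × String)) : Option (String × String) :=
  let t := PySem.Str.lower (PySem.Str.strip (jget j "title"))
  let c := PySem.Str.lower (PySem.Str.strip (jget j "company"))
  if t = "" ∨ c = "" then none else some (t, c)

-- A's loop body: registry × order × unkeyed
def stepA (st : PySem.Dict (String × String) (List (String × String)) × List (String × String) × List (List (String × String)))
    (j : List (String × String)) :
    PySem.Dict (String × String) (List (String × String)) × List (String × String) × List (List (String × String)) :=
  match atsKey j with
  | none => (st.1, st.2.1, st.2.2 ++ [j])
  | some key =>
    if st.1.contains key = false then
      (st.1.insert key j, st.2.1 ++ [key], st.2.2)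
    else
      let first := st.1.getD key []
      let first := jset first "location"
        (mergeLoc (PySem.Str.strip (jget first "location")) (PySem.Str.strip (jget j "location")))
      let d1 := jget first "job_description"
      let d2 := jget j "job_description"
      let first := if PySem.Str.len d1 < PySem.Str.len d2 then jset first "job_description" d2 else first
      (st.1.insert key first, st.2.1, st.2.2)

def dedupe_ats_jobs_by_title_company_py (jobs : List (List (String × String))) : (List (List (String × String))) × Int :=
  let st := jobs.foldl stepA (PySem.Dict.empty, [], [])
  let out := st.2.1.map (fun k => st.1.getD k []) ++ st.2.2
  (out, (jobs.length : Int) - out.length)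

-- ===== PORT B =====
def mergeJob (acc j : List (String × String)) : List (String × String) :=
  let acc1 := jset acc "location"
    (mergeLoc (PySem.Str.strip (jget acc "location")) (PySem.Str.strip (jget j "location")))
  if PySem.Str.len (jget acc1 "job_description") < PySem.Str.len (jget j "job_description") then
    jset acc1 "job_description" (jget j "job_description")
  else acc1

-- B pass 1 loop body: groups × unkeyed
def stepB (st : PySem.Dict (String × String) (List (List (String × String))) × List (List (String × String)))
    (j : List (String × String)) :
    PySem.Dict (String × String) (List (List (String × String))) × List (List (String × String)) :=
  match atsKey j with
  | none => (st.1, st.2 ++ [j])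
  | some key => (st.1.insert key (st.1.getD key [] ++ [j]), st.2)

-- B pass 2: reduce one group ([] branch is unreachable: groups hold nonempty lists)
def reduceGroup (gs : List (List (String × String))) : List (String × String) :=
  match gs with
  | [] => []
  | a :: rest => rest.foldl mergeJob a

def dedupe_ats_jobs_by_title_company_py_alt (jobs : List (List (String × String))) : (List (List (String × String))) × Int :=
  let st := jobs.foldl stepB (PySem.Dict.empty, [])
  let out := st.1.items.map (fun kg => reduceGroup kg.2) ++ st.2
  (out, (jobs.length : Int) - out.length)

-- ===== PRECONDITION & SPEC =====
def Spec_dedupe_ats_jobs_by_title_company_py (jobs : List (List (String × String))) (out : (List (List (String × String))) × Int) : Prop := out = dedupe_ats_jobs_by_title_company_py_alt jobs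
instance (jobs : List (List (String × String))) (out : (List (List (String × String))) × Int) : Decidable (Spec_dedupe_ats_jobs_by_title_company_py jobs out) := by unfold Spec_dedupe_ats_jobs_by_title_company_py; infer_instance

-- ===== CLAIM (what is proved, stated in full; the proofs are below) =====
def Claim_equal_dedupe_ats_jobs_by_title_company_py : Prop := ∀ (jobs : List (List (String × String))), Dom_dedupe_ats_jobs_by_title_company_py jobs → Spec_dedupe_ats_jobs_by_title_company_py jobs (dedupe_ats_jobs_by_title_company_py jobs)

-- ===== LEMMAS AND PROOFS =====

-- The invariant tying A's state to B's state after the same prefix of jobs.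
def RelAB (stA : PySem.Dict (String × String) (List (String × String)) × List (String × String) × List (List (String × String)))
    (stB : PySem.Dict (String × String) (List (List (String × String))) × List (List (String × String))) : Prop :=
  stA.2.2 = stB.2 ∧ stA.2.1 = stB.1.keys ∧ stB.1.keys.Nodup ∧
  (∀ k gs, stB.1.get? k = some gs → gs ≠ []) ∧
  (∀ k, stA.1.get? k = (stB.1.get? k).map reduceGroup)

theorem rel_step (stA : PySem.Dict (String × String) (List (String × String)) × List (String × String) × List (List (String × String))) (stB : PySem.Dict (String × String) (List (List (String × String))) × List (List (String × String))) (j : List (String × String)) (h : RelAB stA stB) :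
    RelAB (stepA stA j) (stepB stB j) := by
  obtain ⟨h1, h2, h3, h4, h5⟩ := h
  cases hkey : atsKey j with
  | none =>
    simp only [stepA, stepB, hkey]
    exact ⟨by rw [h1], h2, h3, h4, h5⟩
  | some key =>
    have hiso : stA.1.contains key = (stB.1.get? key).isSome := by
      rw [PySem.Dict.contains_eq_isSome_get?, h5 key]
      cases stB.1.get? key <;> rfl
    simp only [stepA, stepB, hkey]
    by_cases hc : stA.1.contains key = false
    · -- key is new
      have hget : stB.1.get? key = none := by
        cases hB : stB.1.get? key with
        | none => rfl
        | some gs => rw [hB] at hiso; rw [hiso] at hc; simp at hc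
      have hcB : stB.1.contains key = false := by
        rw [PySem.Dict.contains_eq_isSome_get?, hget]; rfl
      have hgd : stB.1.getD key [] = [] := PySem.Dict.getD_of_not_contains stB.1 [] hcB
      have hmem : key ∉ stB.1.keys := by
        intro hm
        rw [← PySem.Dict.contains_iff_mem_keys] at hm
        rw [hm] at hcB; cases hcB
      rw [hc, if_pos rfl]
      refine ⟨h1, ?_, ?_, ?_, ?_⟩
      · rw [h2, hgd, PySem.Dict.keys_insert_of_not_contains stB.1 _ hcB]
      · rw [hgd, PySem.Dict.keys_insert_of_not_contains stB.1 _ hcB]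
        simp [List.nodup_append, h3]
        intro a b hm heq
        exact hmem (heq ▸ hm)
      · intro k gs hg
        rw [hgd] at hg
        rw [PySem.Dict.get?_insert] at hg
        by_cases hk : k = key
        · rw [if_pos hk] at hg
          cases hg; simp
        · rw [if_neg hk] at hg
          exact h4 k gs hg
      · intro k
        rw [hgd]
        rw [PySem.Dict.get?_insert, PySem.Dict.get?_insert]
        by_cases hk : k = key
        · rw [if_pos hk, if_pos hk]; rfl
        · rw [if_neg hk, if_neg hk]; exact h5 k
    · -- key already present: merge into the registered row / append to the group
      have hsome : (stB.1.get? key).isSome := by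
        rw [← hiso]; simp at hc; exact hc
      obtain ⟨gs, hgs⟩ := Option.isSome_iff_exists.mp hsome
      obtain ⟨a, rest, rfl⟩ : ∃ a rest, gs = a :: rest := by
        cases gs with
        | nil => exact absurd rfl (h4 key [] hgs)
        | cons a rest => exact ⟨a, rest, rfl⟩
      have hgdB : stB.1.getD key [] = a :: rest := PySem.Dict.getD_of_get?_eq_some stB.1 [] hgs
      have hgdA : stA.1.getD key [] = reduceGroup (a :: rest) := by
        apply PySem.Dict.getD_of_get?_eq_some stA.1 []
        rw [h5 key, hgs]; rfl
      have hcB : stB.1.contains key = true := by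
        rw [PySem.Dict.contains_eq_isSome_get?, hgs]; rfl
      have hct : stA.1.contains key = true := by simpa using hc
      rw [hct, if_neg (by simp)]
      refine ⟨h1, ?_, ?_, ?_, ?_⟩
      · rw [h2, PySem.Dict.keys_insert_of_contains stB.1 _ hcB]
      · rw [PySem.Dict.keys_insert_of_contains stB.1 _ hcB]; exact h3
      · intro k gs' hg
        rw [PySem.Dict.get?_insert] at hg
        by_cases hk : k = key
        · rw [if_pos hk] at hg
          cases hg; simp [hgdB]
        · rw [if_neg hk] at hg
          exact h4 k gs' hg
      · intro k
        rw [PySem.Dict.get?_insert, PySem.Dict.get?_insert]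
        by_cases hk : k = key
        · rw [if_pos hk, if_pos hk]
          rw [hgdA, hgdB]
          simp only [Option.map_some, List.cons_append, reduceGroup, List.foldl_append, List.foldl_cons,
            List.foldl_nil, mergeJob]
        · rw [if_neg hk, if_neg hk]; exact h5 k
theorem rel_foldl (jobs : List (List (String × String))) (stA : PySem.Dict (String × String) (List (String × String)) × List (String × String) × List (List (String × String))) (stB : PySem.Dict (String × String) (List (List (String × String))) × List (List (String × String))) (h : RelAB stA stB) :
    RelAB (jobs.foldl stepA stA) (jobs.foldl stepB stB) := by
  induction jobs generalizing stA stB with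
  | nil => exact h
  | cons j rest ih =>
    rw [List.foldl_cons, List.foldl_cons]
    exact ih _ _ (rel_step _ _ j h)

-- ===== VERDICT (by name: the statement is the Claim_ definition above) =====
theorem dedupe_ats_jobs_by_title_company_py_spec : Claim_equal_dedupe_ats_jobs_by_title_company_py := by
  intro jobs _
  unfold Spec_dedupe_ats_jobs_by_title_company_py
  have hinit : RelAB (PySem.Dict.empty, [], []) (PySem.Dict.empty, []) := by
    refine ⟨rfl, ?_, ?_, ?_, ?_⟩
    · simp [PySem.Dict.keys_empty]
    · simp [PySem.Dict.keys_empty]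
    · intro k gs hg; rw [PySem.Dict.get?_empty] at hg; cases hg
    · intro k; rw [PySem.Dict.get?_empty, PySem.Dict.get?_empty]; rfl
  obtain ⟨h1, h2, h3, h4, h5⟩ := rel_foldl jobs _ _ hinit
  unfold dedupe_ats_jobs_by_title_company_py dedupe_ats_jobs_by_title_company_py_alt
  set sA := jobs.foldl stepA (PySem.Dict.empty, [], []) with hsA
  set sB := jobs.foldl stepB (PySem.Dict.empty, []) with hsB
  have hout : sA.2.1.map (fun k => sA.1.getD k []) = sB.1.items.map (fun kg => reduceGroup kg.2) := by
    rw [PySem.Dict.items_eq_map_keys sB.1 h3 ([] : List (List (String × String)))]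
    rw [List.map_map, h2]
    apply List.map_congr_left
    intro k hk
    obtain ⟨gs, hgs⟩ : ∃ gs, sB.1.get? k = some gs := by
      cases hg : sB.1.get? k with
      | none => exact absurd hk ((PySem.Dict.get?_eq_none_iff_not_mem_keys sB.1 k).mp hg)
      | some gs => exact ⟨gs, rfl⟩
    have e1 : sA.1.getD k [] = reduceGroup gs :=
      PySem.Dict.getD_of_get?_eq_some sA.1 [] (by rw [h5 k, hgs]; rfl)
    have e2 : sB.1.getD k [] = gs := PySem.Dict.getD_of_get?_eq_some sB.1 [] hgs
    simp [Function.comp, e1, e2]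
  dsimp only
  rw [hout, h1]
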